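-- pv_equiv track=rewrite | github.com/LowerLeBg/puissance-4 | main.py | pointer_pos
-- ===== SOURCE A (Python) =====
-- def pointer_pos(mouse_pos:list,):
--     x_pos = mouse_pos[0]
--     if x_pos<200:
--         x = 0
--     elif x_pos<725:
--         x_pos -= 200
--         x = -1
--         while x_pos > 0 :
--             x_pos -= 75
--             x+=1
--     else :
--         x = 6
--     return x
-- ===== SOURCE B (Python) =====
-- def pointer_pos(mouse_pos:list,):
--     x_pos = mouse_pos[0]
--     if x_pos < 200:
--         return 0
--     if x_pos >= 725:
--         return 6
--     # ceil((x_pos-200)/75) - 1, as integer arithmetic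
--     return (x_pos - 200 + 74) // 75 - 1
-- ===== Notes on version B (the rewrite author's own statement) =====
-- stated objective: simpler
-- what changed: The middle branch's while-loop of repeated 75-subtractions is replaced by a closed-form ceiling division (x_pos-200+74)//75 - 1.
import Mathlib
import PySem

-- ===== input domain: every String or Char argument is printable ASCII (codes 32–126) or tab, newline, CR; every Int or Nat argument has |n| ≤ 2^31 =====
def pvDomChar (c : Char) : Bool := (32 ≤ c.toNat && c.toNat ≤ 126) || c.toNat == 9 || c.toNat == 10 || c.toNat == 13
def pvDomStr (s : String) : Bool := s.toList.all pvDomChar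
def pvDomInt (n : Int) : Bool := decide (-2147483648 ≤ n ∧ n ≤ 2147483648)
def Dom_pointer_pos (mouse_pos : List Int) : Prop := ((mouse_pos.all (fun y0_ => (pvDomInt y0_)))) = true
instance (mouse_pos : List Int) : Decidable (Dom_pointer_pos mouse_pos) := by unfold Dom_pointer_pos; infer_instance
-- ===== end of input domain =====

-- B replaces the middle branch's repeated-subtraction while-loop with a closed-form ceiling division (simpler).


-- ===== PORT A =====
-- the while-loop: while x_pos > 0: x_pos -= 75; x += 1
def pointerLoop (x_pos x : Int) : Int :=
  if x_pos > 0 then pointerLoop (x_pos - 75) (x + 1) else x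
termination_by x_pos.toNat
decreasing_by omega

def pointer_pos (mouse_pos : List Int) : Int :=
  let x_pos := (PySem.List.pyGet? mouse_pos 0).getD 0   -- mouse_pos[0]; Pre_ excludes the empty list
  if x_pos < 200 then 0
  else if x_pos < 725 then pointerLoop (x_pos - 200) (-1)
  else 6

-- ===== PORT B =====
def pointer_pos_alt (mouse_pos : List Int) : Int :=
  let x_pos := (PySem.List.pyGet? mouse_pos 0).getD 0   -- mouse_pos[0]; Pre_ excludes the empty list
  if x_pos < 200 then 0
  else if 725 ≤ x_pos then 6
  else PySem.Int.floordiv (x_pos - 200 + 74) 75 - 1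

-- ===== PRECONDITION & SPEC =====
-- A raises IndexError on the empty list (mouse_pos[0]); so does B.
def Pre_pointer_pos (mouse_pos : List Int) : Prop := mouse_pos ≠ []
instance (mouse_pos : List Int) : Decidable (Pre_pointer_pos mouse_pos) := by unfold Pre_pointer_pos; infer_instance
def pvWitness_pointer_pos : List Int := [350]

def Spec_pointer_pos (mouse_pos : List Int) (out : Int) : Prop := out = pointer_pos_alt mouse_pos
instance (mouse_pos : List Int) (out : Int) : Decidable (Spec_pointer_pos mouse_pos out) := by unfold Spec_pointer_pos; infer_instance

-- ===== CLAIM (what is proved, stated in full; the proofs are below) =====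
def Claim_equal_pointer_pos : Prop := ∀ (mouse_pos : List Int), Dom_pointer_pos mouse_pos → Pre_pointer_pos mouse_pos → Spec_pointer_pos mouse_pos (pointer_pos mouse_pos)

-- ===== LEMMAS AND PROOFS =====

-- the loop computes x0 plus the ceiling of r/75, for r ≥ -74
theorem pointerLoop_eq (n : Nat) (r x0 : Int) (h : -74 ≤ r) (hn : r.toNat ≤ n) :
    pointerLoop r x0 = x0 + PySem.Int.floordiv (r + 74) 75 := by
  induction n generalizing r x0 with
  | zero =>
    rw [pointerLoop]
    rw [PySem.Int.floordiv_eq_ediv_of_pos (by omega)]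
    have hr : r ≤ 0 := by omega
    rw [if_neg (by omega)]
    omega
  | succ n ih =>
    rw [pointerLoop]
    by_cases hpos : r > 0
    · rw [if_pos hpos, ih (r - 75) (x0 + 1) (by omega) (by omega)]
      rw [PySem.Int.floordiv_eq_ediv_of_pos (by omega),
          PySem.Int.floordiv_eq_ediv_of_pos (by omega)]
      omega
    · rw [if_neg hpos]
      rw [PySem.Int.floordiv_eq_ediv_of_pos (by omega)]
      omega

-- ===== VERDICT (by name: the statement is the Claim_ definition above) =====
theorem pointer_pos_spec : Claim_equal_pointer_pos := by
  intro mouse_pos _ _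
  unfold Spec_pointer_pos pointer_pos pointer_pos_alt
  set x := (PySem.List.pyGet? mouse_pos 0).getD 0 with hx
  by_cases h1 : x < 200
  · simp [h1]
  · simp only [if_neg h1]
    by_cases h2 : x < 725
    · rw [if_pos h2, if_neg (by omega), pointerLoop_eq (x - 200).toNat (x - 200) (-1) (by omega) (by omega)]
      omega
    · rw [if_neg h2, if_pos (by omega)]
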